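-- pv_equiv track=rewrite | github.com/vanbelkummax/polymath-v4 | scripts/fill_citation_gaps.py | categorize_dois
-- ===== SOURCE A (Python) =====
-- from collections import Counter
--
-- def categorize_dois(dois_with_counts):
--     """Categorize DOIs by publisher/journal."""
--     categories = Counter()
--     categorized = {}
--
--     for doi, count in dois_with_counts:
--         # Extract publisher prefix
--         if doi.startswith("10.1038/"):
--             cat = "Nature"
--         elif doi.startswith("10.1016/j.cell"):
--             cat = "Cell"
--         elif doi.startswith("10.1126/"):
--             cat = "Science"
--         elif doi.startswith("10.1101/"):
--             cat = "bioRxiv/medRxiv"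
--         elif doi.startswith("10.48550/"):
--             cat = "arXiv"
--         elif doi.startswith("10.1016/"):
--             cat = "Elsevier"
--         elif doi.startswith("10.1093/"):
--             cat = "Oxford"
--         elif doi.startswith("10.1371/"):
--             cat = "PLOS"
--         elif doi.startswith("10.1186/"):
--             cat = "BMC"
--         elif doi.startswith("10.3389/"):
--             cat = "Frontiers"
--         else:
--             cat = "Other"
--
--         categories[cat] += count
--         if cat not in categorized:
--             categorized[cat] = []
--         categorized[cat].append((doi, count))
--
--     return categories, categorized
-- ===== SOURCE B (Python) =====
-- from collections import Counter
--
-- _BY_HEAD = {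
--     "10.1038/": "Nature",
--     "10.1126/": "Science",
--     "10.1101/": "bioRxiv/medRxiv",
--     "10.48550/": "arXiv",
--     "10.1016/": "Elsevier",
--     "10.1093/": "Oxford",
--     "10.1371/": "PLOS",
--     "10.1186/": "BMC",
--     "10.3389/": "Frontiers",
-- }
--
--
-- def _category(doi):
--     # Every prefix in the original chain except the Cell one is a whole
--     # registrant head "10.xxxx/" (up to and including the first slash), and
--     # those heads are pairwise distinct, so one dict lookup on the head
--     # replaces the ordered scan; only the Cell refinement of 10.1016/ needs
--     # its own test.
--     if doi.startswith("10.1016/j.cell"):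
--         return "Cell"
--     return _BY_HEAD.get(doi[:doi.find("/") + 1], "Other")
--
--
-- def categorize_dois(dois_with_counts):
--     """Categorize DOIs by publisher/journal."""
--     cats = [_category(doi) for doi, _ in dois_with_counts]
--     order = list(dict.fromkeys(cats))
--     categorized = {cat: [p for p, c in zip(dois_with_counts, cats) if c == cat]
--                    for cat in order}
--     categories = Counter({cat: sum(n for _, n in grp)
--                           for cat, grp in categorized.items()})
--     return categories, categorized
-- ===== Notes on version B (the rewrite author's own statement) =====
-- stated objective: alternative
-- what changed: B replaces A's ordered if/elif prefix chain by a dict lookup on the DOI's registrant head (the text up to and including the first slash, with one special case for the Cell refinement of 10.1016/), and replaces A's single loop maintaining two dicts by staged passes: a category list, an ordered dedup for first-seen key order, a per-category filter comprehension for the groups, and a Counter derived from the groups.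
import Mathlib
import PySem

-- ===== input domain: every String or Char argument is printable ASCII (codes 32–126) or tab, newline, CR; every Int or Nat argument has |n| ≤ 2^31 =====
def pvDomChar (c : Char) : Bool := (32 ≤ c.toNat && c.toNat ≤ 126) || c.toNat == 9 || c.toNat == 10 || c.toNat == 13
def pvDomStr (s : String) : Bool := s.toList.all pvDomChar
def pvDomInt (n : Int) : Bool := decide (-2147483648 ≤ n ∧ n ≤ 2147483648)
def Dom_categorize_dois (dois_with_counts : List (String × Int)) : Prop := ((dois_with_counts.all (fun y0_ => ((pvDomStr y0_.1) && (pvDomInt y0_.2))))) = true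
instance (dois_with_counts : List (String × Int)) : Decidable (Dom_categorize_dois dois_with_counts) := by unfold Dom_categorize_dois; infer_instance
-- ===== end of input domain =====

-- B looks each DOI's registrant head (text up to and including the first '/') up in a
-- dict, with one special case for the Cell refinement, and builds the result in staged
-- passes (category list, ordered dedup, per-category filters, Counter from the groups)
-- instead of A's ordered prefix chain and single pass maintaining two dicts.
-- Equal return values; neither program observably mutates its argument.

-- ===== PORT A =====
-- A's inline if/elif chain
def pvCatA (doi : String) : String :=
  if PySem.Str.startswith doi "10.1038/" then "Nature"
  else if PySem.Str.startswith doi "10.1016/j.cell" then "Cell"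
  else if PySem.Str.startswith doi "10.1126/" then "Science"
  else if PySem.Str.startswith doi "10.1101/" then "bioRxiv/medRxiv"
  else if PySem.Str.startswith doi "10.48550/" then "arXiv"
  else if PySem.Str.startswith doi "10.1016/" then "Elsevier"
  else if PySem.Str.startswith doi "10.1093/" then "Oxford"
  else if PySem.Str.startswith doi "10.1371/" then "PLOS"
  else if PySem.Str.startswith doi "10.1186/" then "BMC"
  else if PySem.Str.startswith doi "10.3389/" then "Frontiers"
  else "Other"

def categorize_dois (dois_with_counts : List (String × Int)) : (List (String × Int)) × (List (String × List (String × Int))) :=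
  let st := dois_with_counts.foldl
    (fun (st : PySem.Dict String Int × PySem.Dict String (List (String × Int))) p =>
      let cat := pvCatA p.1
      let categories := st.1.modify cat 0 (· + p.2)
      let categorized := if st.2.contains cat then st.2 else st.2.insert cat []
      let categorized := categorized.insert cat (categorized.getD cat [] ++ [p])
      (categories, categorized))
    (PySem.Dict.empty, PySem.Dict.empty)
  (st.1.items, st.2.items)

-- ===== PORT B =====
-- B's _BY_HEAD dict
def pvByHead : PySem.Dict String String := PySem.Dict.mk
  [("10.1038/", "Nature"), ("10.1126/", "Science"), ("10.1101/", "bioRxiv/medRxiv"),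
   ("10.48550/", "arXiv"), ("10.1016/", "Elsevier"), ("10.1093/", "Oxford"),
   ("10.1371/", "PLOS"), ("10.1186/", "BMC"), ("10.3389/", "Frontiers")]

-- B's _category: the Cell test, then _BY_HEAD.get(doi[:doi.find("/") + 1], "Other")
def pvCategory (doi : String) : String :=
  if PySem.Str.startswith doi "10.1016/j.cell" then "Cell"
  else pvByHead.getD (PySem.Str.slice doi none (some (PySem.Str.find doi "/" + 1))) "Other"

def categorize_dois_alt (dois_with_counts : List (String × Int)) : (List (String × Int)) × (List (String × List (String × Int))) :=
  -- cats = [_category(doi) for doi, _ in dois_with_counts]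
  let cats := dois_with_counts.map (fun p => pvCategory p.1)
  let order := PySem.List.dedup cats
  let categorized := order.map (fun cat =>
    (cat, ((dois_with_counts.zip cats).filter (fun pc => pc.2 == cat)).map (fun pc => pc.1)))
  let categories := categorized.map (fun kv => (kv.1, (kv.2.map (fun q => q.2)).sum))
  (categories, categorized)

-- ===== PRECONDITION & SPEC =====
def Spec_categorize_dois (dois_with_counts : List (String × Int)) (out : (List (String × Int)) × (List (String × List (String × Int)))) : Prop := out = categorize_dois_alt dois_with_counts
instance (dois_with_counts : List (String × Int)) (out : (List (String × Int)) × (List (String × List (String × Int)))) : Decidable (Spec_categorize_dois dois_with_counts out) := by unfold Spec_categorize_dois; infer_instance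

-- ===== CLAIM (what is proved, stated in full; the proofs are below) =====
def Claim_equal_categorize_dois : Prop := ∀ (dois_with_counts : List (String × Int)), Dom_categorize_dois dois_with_counts → Spec_categorize_dois dois_with_counts (categorize_dois dois_with_counts)

-- ===== LEMMAS AND PROOFS =====

-- a one-element list is a prefix exactly when it is the head
lemma pvSingleton_prefix (a : Char) (l : List Char) : [a] <+: l ↔ l.head? = some a := by
  cases l <;> simp [List.cons_prefix_cons, eq_comm]

-- the head doi[:doi.find("/")+1] equals q ++ "/" exactly when q ++ "/" is a prefix of doi
lemma pvTake_head (q cs : List Char) (hq : '/' ∉ q) :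
    (q ++ ['/']) <+: cs ↔ cs.take (PySem.Chars.find cs ['/'] + 1).toNat = q ++ ['/'] := by
  constructor
  · rintro ⟨r, rfl⟩
    have hinf : ['/'] <:+: q ++ ['/'] ++ r := ⟨q, r, by simp⟩
    have h0 : 0 ≤ PySem.Chars.find (q ++ ['/'] ++ r) ['/'] :=
      (PySem.Chars.find_nonneg_iff _ _).mpr hinf
    obtain ⟨hpre, hmin⟩ := PySem.Chars.find_spec h0
    set F := (PySem.Chars.find (q ++ ['/'] ++ r) ['/']).toNat with hF
    have hdropq : (q ++ ['/'] ++ r).drop q.length = '/' :: r := by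
      rw [List.append_assoc, List.drop_left]; rfl
    have hle : F ≤ q.length := by
      by_contra hlt
      exact hmin q.length (by omega) (by rw [hdropq]; exact ⟨r, rfl⟩)
    have heq : F = q.length := by
      rcases Nat.lt_or_ge F q.length with hlt | hge
      · exfalso
        have hh := (pvSingleton_prefix _ _).mp hpre
        rw [List.head?_drop] at hh
        have : (q ++ ['/'] ++ r)[F]? = q[F]? := by
          rw [List.append_assoc, List.getElem?_append_left hlt]
        rw [this] at hh
        exact hq (List.mem_of_getElem? hh)
      · omega
    have : ((PySem.Chars.find (q ++ ['/'] ++ r) ['/']) + 1).toNat = q.length + 1 := by omega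
    rw [this]
    exact List.take_left' (by simp)
  · intro h
    exact h ▸ List.take_prefix _ cs

-- B's head slice equals the string p exactly when p is a prefix (p = q ++ "/", '/' ∉ q)
lemma pvHead_eq_iff (doi p : String) (q : List Char) (hp : p.toList = q ++ ['/']) (hq : '/' ∉ q) :
    (PySem.Str.startswith doi p = true ↔
      PySem.Str.slice doi none (some (PySem.Str.find doi "/" + 1)) = p) := by
  have hfind : PySem.Str.find doi "/" = PySem.Chars.find doi.toList ['/'] := rfl
  have h0 : 0 ≤ PySem.Chars.find doi.toList ['/'] + 1 := by
    have := PySem.Chars.neg_one_le_find doi.toList ['/']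
    omega
  have hsl : PySem.Str.slice doi none (some (PySem.Str.find doi "/" + 1))
      = String.ofList (doi.toList.take (PySem.Chars.find doi.toList ['/'] + 1).toNat) := by
    show String.ofList (PySem.Chars.slice doi.toList none (some (PySem.Str.find doi "/" + 1))) = _
    rw [PySem.Chars.slice_eq_listSlice, hfind, PySem.List.slice_to _ h0]
  rw [PySem.Str.startswith_eq, PySem.Chars.startswith_iff, hp,
    pvTake_head q doi.toList hq, hsl]
  constructor
  · intro h; rw [h, ← hp, String.ofList_toList]
  · intro h
    have := congrArg String.toList h
    simpa [hp] using this

-- a head matching no key of _BY_HEAD falls through to "Other"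
lemma pvGetD_other (s : String) (h1 : s ≠ "10.1038/") (h2 : s ≠ "10.1126/") (h3 : s ≠ "10.1101/")
    (h4 : s ≠ "10.48550/") (h5 : s ≠ "10.1016/") (h6 : s ≠ "10.1093/") (h7 : s ≠ "10.1371/")
    (h8 : s ≠ "10.1186/") (h9 : s ≠ "10.3389/") : pvByHead.getD s "Other" = "Other" := by
  simp [pvByHead, PySem.Dict.getD_eq_get?_getD, PySem.Dict.get?_mk_cons,
    Ne.symm h1, Ne.symm h2, Ne.symm h3, Ne.symm h4, Ne.symm h5, Ne.symm h6, Ne.symm h7,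
    Ne.symm h8, Ne.symm h9, PySem.Dict.get?]


-- two prefixes of the same string are comparable, so startswith p rules out incomparable p'
lemma pvNot_startswith (doi p p' : String) (h : PySem.Str.startswith doi p = true)
    (hn1 : ¬ (p.toList <+: p'.toList)) (hn2 : ¬ (p'.toList <+: p.toList)) :
    PySem.Str.startswith doi p' = false := by
  rw [PySem.Str.startswith_eq] at h ⊢
  rw [PySem.Chars.startswith_iff] at h
  rw [← Bool.not_eq_true, PySem.Chars.startswith_iff]
  intro h'
  rcases List.prefix_or_prefix_of_prefix h h' with hc | hc
  · exact hn1 hc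
  · exact hn2 hc

-- the two category functions agree
lemma pvCat_eq (doi : String) : pvCategory doi = pvCatA doi := by
  unfold pvCategory pvCatA
  by_cases h2 : PySem.Str.startswith doi "10.1016/j.cell" = true
  · have h1 : PySem.Str.startswith doi "10.1038/" = false :=
      pvNot_startswith doi "10.1016/j.cell" "10.1038/" h2 (by decide) (by decide)
    simp only [h1, h2, Bool.false_eq_true, eq_self_iff_true, if_true, if_false]
  · rw [Bool.not_eq_true] at h2
    by_cases h1 : PySem.Str.startswith doi "10.1038/" = true
    · have hh := (pvHead_eq_iff doi "10.1038/" "10.1038".toList (by decide) (by decide)).mp h1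
      simp only [h1, h2, Bool.false_eq_true, eq_self_iff_true, if_true, if_false]
      rw [hh]
      decide
    · rw [Bool.not_eq_true] at h1
      by_cases h3 : PySem.Str.startswith doi "10.1126/" = true
      · have hh := (pvHead_eq_iff doi "10.1126/" "10.1126".toList (by decide) (by decide)).mp h3
        simp only [h1, h3, h2, Bool.false_eq_true, eq_self_iff_true, if_true, if_false]
        rw [hh]
        decide
      · rw [Bool.not_eq_true] at h3
        by_cases h4 : PySem.Str.startswith doi "10.1101/" = true
        · have hh := (pvHead_eq_iff doi "10.1101/" "10.1101".toList (by decide) (by decide)).mp h4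
          simp only [h1, h3, h4, h2, Bool.false_eq_true, eq_self_iff_true, if_true, if_false]
          rw [hh]
          decide
        · rw [Bool.not_eq_true] at h4
          by_cases h5 : PySem.Str.startswith doi "10.48550/" = true
          · have hh := (pvHead_eq_iff doi "10.48550/" "10.48550".toList (by decide) (by decide)).mp h5
            simp only [h1, h3, h4, h5, h2, Bool.false_eq_true, eq_self_iff_true, if_true, if_false]
            rw [hh]
            decide
          · rw [Bool.not_eq_true] at h5
            by_cases h6 : PySem.Str.startswith doi "10.1016/" = true
            · have hh := (pvHead_eq_iff doi "10.1016/" "10.1016".toList (by decide) (by decide)).mp h6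
              simp only [h1, h3, h4, h5, h6, h2, Bool.false_eq_true, eq_self_iff_true, if_true, if_false]
              rw [hh]
              decide
            · rw [Bool.not_eq_true] at h6
              by_cases h7 : PySem.Str.startswith doi "10.1093/" = true
              · have hh := (pvHead_eq_iff doi "10.1093/" "10.1093".toList (by decide) (by decide)).mp h7
                simp only [h1, h3, h4, h5, h6, h7, h2, Bool.false_eq_true, eq_self_iff_true, if_true, if_false]
                rw [hh]
                decide
              · rw [Bool.not_eq_true] at h7
                by_cases h8 : PySem.Str.startswith doi "10.1371/" = true
                · have hh := (pvHead_eq_iff doi "10.1371/" "10.1371".toList (by decide) (by decide)).mp h8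
                  simp only [h1, h3, h4, h5, h6, h7, h8, h2, Bool.false_eq_true, eq_self_iff_true, if_true, if_false]
                  rw [hh]
                  decide
                · rw [Bool.not_eq_true] at h8
                  by_cases h9 : PySem.Str.startswith doi "10.1186/" = true
                  · have hh := (pvHead_eq_iff doi "10.1186/" "10.1186".toList (by decide) (by decide)).mp h9
                    simp only [h1, h3, h4, h5, h6, h7, h8, h9, h2, Bool.false_eq_true, eq_self_iff_true, if_true, if_false]
                    rw [hh]
                    decide
                  · rw [Bool.not_eq_true] at h9
                    by_cases h10 : PySem.Str.startswith doi "10.3389/" = true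
                    · have hh := (pvHead_eq_iff doi "10.3389/" "10.3389".toList (by decide) (by decide)).mp h10
                      simp only [h1, h3, h4, h5, h6, h7, h8, h9, h10, h2, Bool.false_eq_true, eq_self_iff_true, if_true, if_false]
                      rw [hh]
                      decide
                    · rw [Bool.not_eq_true] at h10
                      have n1 : PySem.Str.slice doi none (some (PySem.Str.find doi "/" + 1)) ≠ "10.1038/" := fun he => Bool.false_ne_true (h1 ▸ (pvHead_eq_iff doi "10.1038/" "10.1038".toList (by decide) (by decide)).mpr he)
                      have n2 : PySem.Str.slice doi none (some (PySem.Str.find doi "/" + 1)) ≠ "10.1126/" := fun he => Bool.false_ne_true (h3 ▸ (pvHead_eq_iff doi "10.1126/" "10.1126".toList (by decide) (by decide)).mpr he)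
                      have n3 : PySem.Str.slice doi none (some (PySem.Str.find doi "/" + 1)) ≠ "10.1101/" := fun he => Bool.false_ne_true (h4 ▸ (pvHead_eq_iff doi "10.1101/" "10.1101".toList (by decide) (by decide)).mpr he)
                      have n4 : PySem.Str.slice doi none (some (PySem.Str.find doi "/" + 1)) ≠ "10.48550/" := fun he => Bool.false_ne_true (h5 ▸ (pvHead_eq_iff doi "10.48550/" "10.48550".toList (by decide) (by decide)).mpr he)
                      have n5 : PySem.Str.slice doi none (some (PySem.Str.find doi "/" + 1)) ≠ "10.1016/" := fun he => Bool.false_ne_true (h6 ▸ (pvHead_eq_iff doi "10.1016/" "10.1016".toList (by decide) (by decide)).mpr he)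
                      have n6 : PySem.Str.slice doi none (some (PySem.Str.find doi "/" + 1)) ≠ "10.1093/" := fun he => Bool.false_ne_true (h7 ▸ (pvHead_eq_iff doi "10.1093/" "10.1093".toList (by decide) (by decide)).mpr he)
                      have n7 : PySem.Str.slice doi none (some (PySem.Str.find doi "/" + 1)) ≠ "10.1371/" := fun he => Bool.false_ne_true (h8 ▸ (pvHead_eq_iff doi "10.1371/" "10.1371".toList (by decide) (by decide)).mpr he)
                      have n8 : PySem.Str.slice doi none (some (PySem.Str.find doi "/" + 1)) ≠ "10.1186/" := fun he => Bool.false_ne_true (h9 ▸ (pvHead_eq_iff doi "10.1186/" "10.1186".toList (by decide) (by decide)).mpr he)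
                      have n9 : PySem.Str.slice doi none (some (PySem.Str.find doi "/" + 1)) ≠ "10.3389/" := fun he => Bool.false_ne_true (h10 ▸ (pvHead_eq_iff doi "10.3389/" "10.3389".toList (by decide) (by decide)).mpr he)
                      rw [pvGetD_other _ n1 n2 n3 n4 n5 n6 n7 n8 n9]
                      simp only [h1, h3, h4, h5, h6, h7, h8, h9, h10, h2, Bool.false_eq_true, eq_self_iff_true, if_true, if_false]

-- value of a summing modify-loop
lemma pvGetD_foldl_modify_add (l : List (String × Int)) (key : String × Int → String)
    (d : PySem.Dict String Int) (c : String) :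
    (l.foldl (fun d p => d.modify (key p) 0 (· + p.2)) d).getD c 0
      = d.getD c 0 + ((l.filter (fun p => key p == c)).map (fun p => p.2)).sum := by
  induction l generalizing d with
  | nil => simp
  | cons p t ih =>
    simp only [List.foldl_cons, ih, List.filter_cons]
    rw [PySem.Dict.getD_modify]
    by_cases hc : c = key p
    · rw [if_pos hc]
      have hb : (key p == c) = true := beq_iff_eq.mpr hc.symm
      rw [hb, if_pos rfl, List.map_cons, List.sum_cons, ← hc]
      omega
    · rw [if_neg hc]
      have hb : (key p == c) = false := beq_eq_false_iff_ne.mpr (Ne.symm hc)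
      rw [hb]
      simp

-- A's two-step categorized update is a single modify
lemma pvStep_catd (d : PySem.Dict String (List (String × Int))) (cat : String) (p : String × Int) :
    (let d' := if d.contains cat then d else d.insert cat []
     d'.insert cat (d'.getD cat [] ++ [p])) = d.modify cat [] (· ++ [p]) := by
  by_cases h : d.contains cat = true
  · simp only [h, if_true]
    rfl
  · simp only [Bool.not_eq_true] at h
    simp only [h, Bool.false_eq_true, if_false]
    rw [PySem.Dict.getD_insert_self, PySem.Dict.insert_insert_self]
    show _ = d.insert cat (d.getD cat [] ++ [p])
    rw [PySem.Dict.getD_of_not_contains _ _ h]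

-- A's fold splits into a counting fold and a grouping fold
lemma pvA_split (l : List (String × Int)) :
    categorize_dois l =
      ((l.foldl (fun d p => d.modify (pvCatA p.1) 0 (· + p.2)) PySem.Dict.empty).items,
       (l.foldl (fun d p => d.modify (pvCatA p.1) [] (· ++ [p])) PySem.Dict.empty).items) := by
  unfold categorize_dois
  have hb :
      (fun (st : PySem.Dict String Int × PySem.Dict String (List (String × Int))) p =>
        let cat := pvCatA p.1
        let categories := st.1.modify cat 0 (· + p.2)
        let categorized := if st.2.contains cat then st.2 else st.2.insert cat []
        let categorized := categorized.insert cat (categorized.getD cat [] ++ [p])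
        (categories, categorized))
      = (fun (st : PySem.Dict String Int × PySem.Dict String (List (String × Int))) p =>
          (st.1.modify (pvCatA p.1) 0 (· + p.2), st.2.modify (pvCatA p.1) [] (· ++ [p]))) := by
    funext st p
    exact congrArg _ (pvStep_catd st.2 (pvCatA p.1) p)
  rw [hb]
  exact congrArg (fun st : PySem.Dict String Int × PySem.Dict String (List (String × Int)) => (st.1.items, st.2.items))
    (PySem.List.foldl_prod_mk (f := fun d (p : String × Int) => d.modify (pvCatA p.1) 0 (· + p.2))
      (g := fun d (p : String × Int) => d.modify (pvCatA p.1) [] (· ++ [p])) l PySem.Dict.empty PySem.Dict.empty)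

-- the grouping fold's getD is a filter
lemma pvG_getD (l : List (String × Int)) (c : String) :
    (l.foldl (fun d p => d.modify (pvCatA p.1) [] (· ++ [p])) PySem.Dict.empty).getD c []
      = l.filter (fun p => pvCatA p.1 == c) := by
  have h2 : (l.foldl (fun d p => d.modify (pvCatA p.1) [] (· ++ [p])) PySem.Dict.empty)
      = ((l.map (fun p : String × Int => ((pvCatA p.1, p) : String × (String × Int)))).foldl
          (fun d (q : String × (String × Int)) => d.modify q.1 [] (· ++ [q.2])) PySem.Dict.empty) :=
    (List.foldl_map (f := fun p : String × Int => ((pvCatA p.1, p) : String × (String × Int)))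
      (g := fun d (q : String × (String × Int)) => d.modify q.1 [] (· ++ [q.2]))
      (l := l) (init := PySem.Dict.empty)).symm
  rw [h2, PySem.Dict.getD_foldl_modify_append]
  simp [List.filter_map, Function.comp_def]

-- the counting fold's getD is the group sum
lemma pvC_getD (l : List (String × Int)) (c : String) :
    (l.foldl (fun d p => d.modify (pvCatA p.1) 0 (· + p.2)) PySem.Dict.empty).getD c 0
      = ((l.filter (fun p => pvCatA p.1 == c)).map (fun p => p.2)).sum := by
  rw [pvGetD_foldl_modify_add l (fun p => pvCatA p.1) PySem.Dict.empty c]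
  simp

-- ===== VERDICT (by name: the statement is the Claim_ definition above) =====
theorem categorize_dois_spec : Claim_equal_categorize_dois := by
  intro l _
  show categorize_dois l = categorize_dois_alt l
  rw [pvA_split]
  unfold categorize_dois_alt
  have hcats : l.map (fun p => pvCategory p.1) = l.map (fun p => pvCatA p.1) :=
    List.map_congr_left (fun p _ => pvCat_eq p.1)
  set f : String × Int → String := fun p => pvCatA p.1 with hf
  set G := l.foldl (fun d p => d.modify (f p) [] (· ++ [p])) PySem.Dict.empty with hG
  set C := l.foldl (fun d p => d.modify (f p) 0 (· + p.2)) PySem.Dict.empty with hC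
  have hGkeys : G.keys = PySem.Set.ofList (l.map f) := by
    rw [hG, PySem.Dict.keys_foldl_modify_key]
    rfl
  have hCkeys : C.keys = PySem.Set.ofList (l.map f) := by
    rw [hC, PySem.Dict.keys_foldl_modify_key]
    rfl
  have hGnd : G.keys.Nodup := by
    rw [hGkeys]; exact PySem.Set.nodup_ofList _
  have hCnd : C.keys.Nodup := by
    rw [hCkeys]; exact PySem.Set.nodup_ofList _
  have hGitems : G.items = (PySem.Set.ofList (l.map f)).map
      (fun c => (c, l.filter (fun p => f p == c))) := by
    rw [PySem.Dict.items_eq_map_keys G hGnd [], hGkeys]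
    exact List.map_congr_left (fun c _ => by rw [hG, pvG_getD])
  have hCitems : C.items = (PySem.Set.ofList (l.map f)).map
      (fun c => (c, ((l.filter (fun p => f p == c)).map (fun p => p.2)).sum)) := by
    rw [PySem.Dict.items_eq_map_keys C hCnd 0, hCkeys]
    exact List.map_congr_left (fun c _ => by rw [hC, pvC_getD])
  have hzip : l.zip (l.map f) = l.map (fun p => (p, f p)) := by
    simpa using (List.zip_map' (f := id) (g := f) (l := l))
  have hgrp : ∀ c, ((l.zip (l.map f)).filter (fun pc => pc.2 == c)).map (fun pc => pc.1)
      = l.filter (fun p => f p == c) := by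
    intro c
    rw [hzip]
    simp [List.filter_map, Function.comp_def]
  rw [hcats]
  simp only [PySem.List.dedup_eq_ofList]
  refine Prod.ext ?_ ?_
  · show _ = ((PySem.Set.ofList (l.map f)).map _).map _
    rw [hCitems]
    rw [List.map_map]
    refine List.map_congr_left (fun c _ => ?_)
    simp [hgrp c]
  · show _ = (PySem.Set.ofList (l.map f)).map _
    rw [hGitems]
    refine List.map_congr_left (fun c _ => ?_)
    simp [hgrp c]
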